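-- pv_equiv track=rewrite | github.com/vincentdaum/bettergut | RAG_and_crawler/integration/medical_data_integration.py | _identify_chunk_boundaries
-- ===== SOURCE A (Python) =====
-- from typing import List, Dict, Any
--
-- def _identify_chunk_boundaries(content: str) -> List[int]:
--     """Identify optimal chunk boundaries for vector embedding"""
--     # Simple implementation - split on paragraphs
--     paragraphs = content.split('\n\n')
--     boundaries = []
--     current_pos = 0
--
--     for paragraph in paragraphs:
--         current_pos += len(paragraph) + 2  # +2 for \n\n
--         boundaries.append(current_pos)
--
--     return boundaries
-- ===== SOURCE B (Python) =====
-- from typing import List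
--
-- def _identify_chunk_boundaries(content: str) -> List[int]:
--     """Identify optimal chunk boundaries for vector embedding.
--
--     Scans the string for '\n\n' separators directly instead of splitting
--     into paragraphs and prefix-summing their lengths."""
--     boundaries = []
--     i = 0
--     n = len(content)
--     while i < n - 1:
--         if content[i] == '\n' and content[i + 1] == '\n':
--             boundaries.append(i + 2)
--             i += 2
--         else:
--             i += 1
--     boundaries.append(n + 2)
--     return boundaries
-- ===== Notes on version B (the rewrite author's own statement) =====
-- stated objective: alternative
-- what changed: B scans the original string once for blank-line separator positions (appending the final length-plus-two boundary at the end) instead of splitting into a paragraph list and prefix-summing paragraph lengths, so no intermediate substrings are built.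
import Mathlib
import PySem

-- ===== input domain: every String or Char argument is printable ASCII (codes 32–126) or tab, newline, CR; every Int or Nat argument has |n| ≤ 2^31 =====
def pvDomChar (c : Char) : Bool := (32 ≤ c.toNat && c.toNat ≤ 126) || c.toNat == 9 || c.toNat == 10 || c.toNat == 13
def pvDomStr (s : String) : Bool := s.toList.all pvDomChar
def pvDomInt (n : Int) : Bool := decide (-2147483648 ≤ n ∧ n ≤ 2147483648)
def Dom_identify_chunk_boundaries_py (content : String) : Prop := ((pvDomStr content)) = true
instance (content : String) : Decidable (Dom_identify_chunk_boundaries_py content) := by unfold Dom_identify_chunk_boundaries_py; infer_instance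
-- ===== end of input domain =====

-- B scans the string once for '\n\n' separator positions instead of splitting into
-- paragraphs and prefix-summing their lengths; same cost, no intermediate substrings.

-- ===== PORT A =====
-- content.split('\n\n') with the non-empty literal separator: PySem.Chars.splitOn is exact here.
def identify_chunk_boundaries_py (content : String) : List Int :=
  let paragraphs := PySem.Chars.splitOn content.toList ['\n', '\n']
  let st := paragraphs.foldl
    (fun (st : List Int × Int) p =>
      let pos := st.2 + (p.length : Int) + 2
      (st.1 ++ [pos], pos)) ([], 0)
  st.1

-- ===== PORT B =====
-- the while-loop over index i (checking content[i], content[i+1]) as structural recursion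
def bScan : List Char → Int → List Int
  | c1 :: c2 :: rest, i =>
      if c1 = '\n' ∧ c2 = '\n' then (i + 2) :: bScan rest (i + 2)
      else bScan (c2 :: rest) (i + 1)
  | _, _ => []

def identify_chunk_boundaries_py_alt (content : String) : List Int :=
  bScan content.toList 0 ++ [(content.toList.length : Int) + 2]

-- ===== PRECONDITION & SPEC =====
def Spec_identify_chunk_boundaries_py (content : String) (out : List Int) : Prop := out = identify_chunk_boundaries_py_alt content
instance (content : String) (out : List Int) : Decidable (Spec_identify_chunk_boundaries_py content out) := by unfold Spec_identify_chunk_boundaries_py; infer_instance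

-- ===== CLAIM (what is proved, stated in full; the proofs are below) =====
def Claim_equal_identify_chunk_boundaries_py : Prop := ∀ (content : String), Dom_identify_chunk_boundaries_py content → Spec_identify_chunk_boundaries_py content (identify_chunk_boundaries_py content)

-- ===== LEMMAS AND PROOFS =====

-- simple recursive presentation of splitOn with separator "\n\n"
def mySplit : List Char → List Char → List (List Char)
  | [], cur => [cur.reverse]
  | l@(c :: rest), cur =>
      if ['\n', '\n'].isPrefixOf l then cur.reverse :: mySplit (l.drop 2) []
      else mySplit rest (c :: cur)
termination_by l _ => l.length
decreasing_by all_goals simp_all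

-- boundaries of a paragraph list starting at position pos
def gBounds : List (List Char) → Int → List Int
  | [], _ => []
  | p :: t, pos => (pos + (p.length : Int) + 2) :: gBounds t (pos + (p.length : Int) + 2)

lemma go_spec : ∀ (fuel : Nat) (l cur : List Char) (acc : List (List Char)),
    l.length < fuel →
    PySem.Chars.splitOn.go ['\n', '\n'] fuel l cur acc = acc.reverse ++ mySplit l cur := by
  intro fuel
  induction fuel with
  | zero => intro l cur acc h; omega
  | succ n ih =>
    intro l cur acc h
    cases l with
    | nil => simp [PySem.Chars.splitOn.go, mySplit]
    | cons c rest =>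
      by_cases hp : ['\n', '\n'].isPrefixOf (c :: rest)
      · have hlen : (c :: rest).length ≥ 2 := by
          rcases rest with _ | ⟨c2, r2⟩ <;> simp_all [List.isPrefixOf]
        rw [show PySem.Chars.splitOn.go ['\n', '\n'] (n + 1) (c :: rest) cur acc
              = PySem.Chars.splitOn.go ['\n', '\n'] n ((c :: rest).drop 2) [] (cur.reverse :: acc) by
            simp [PySem.Chars.splitOn.go, hp]]
        rw [ih _ _ _ (by simp at h hlen ⊢; omega)]
        simp [mySplit, hp]
      · rw [show PySem.Chars.splitOn.go ['\n', '\n'] (n + 1) (c :: rest) cur acc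
              = PySem.Chars.splitOn.go ['\n', '\n'] n rest (c :: cur) acc by
            simp [PySem.Chars.splitOn.go, hp]]
        rw [ih _ _ _ (by simp at h ⊢; omega)]
        simp [mySplit, hp]

lemma splitOn_eq_mySplit (l : List Char) :
    PySem.Chars.splitOn l ['\n', '\n'] = mySplit l [] := by
  simpa using go_spec (l.length + 1) l [] [] (by omega)

lemma foldA (ps : List (List Char)) : ∀ (acc : List Int) (pos : Int),
    (ps.foldl (fun (st : List Int × Int) p =>
      let pos := st.2 + (p.length : Int) + 2
      (st.1 ++ [pos], pos)) (acc, pos)).1 = acc ++ gBounds ps pos := by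
  induction ps with
  | nil => simp [gBounds]
  | cons p t ih => intro acc pos; simp [gBounds, ih]

lemma bScan_step (c : Char) (rest : List Char) (p : Int)
    (h : ¬ (['\n', '\n'].isPrefixOf (c :: rest))) :
    bScan (c :: rest) p = bScan rest (p + 1) := by
  cases rest with
  | nil => simp [bScan]
  | cons c2 r2 =>
    have : ¬ (c = '\n' ∧ c2 = '\n') := by
      intro ⟨h1, h2⟩; exact h (by simp [h1, h2, List.isPrefixOf])
    simp [bScan, this]

lemma key (l cur : List Char) : ∀ (pos : Int),
    gBounds (mySplit l cur) pos
      = bScan l (pos + cur.length) ++ [pos + cur.length + l.length + 2] := by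
  induction l, cur using mySplit.induct with
  | case1 cur => intro pos; simp [mySplit, gBounds, bScan]
  | case2 c rest cur hp ih =>
    intro pos
    have hc : c = '\n' ∧ ∃ r2, rest = '\n' :: r2 := by
      rcases rest with _ | ⟨c2, r2⟩
      · simp [List.isPrefixOf] at hp
      · simp [List.isPrefixOf] at hp
        exact ⟨hp.1.symm, r2, by rw [← hp.2]⟩
    obtain ⟨rfl, r2, rfl⟩ := hc
    rw [mySplit]
    simp only [if_pos hp]
    rw [gBounds]
    simp only [List.drop_succ_cons, List.drop_zero] at ih ⊢
    rw [ih]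
    rw [show bScan ('\n' :: '\n' :: r2) (pos + ↑cur.length)
          = (pos + ↑cur.length + 2) :: bScan r2 (pos + ↑cur.length + 2) by simp [bScan]]
    simp only [List.length_reverse, List.cons_append, List.length_cons, List.length_nil]
    push_cast
    ring_nf
  | case3 c rest cur hp ih =>
    intro pos
    rw [mySplit]
    simp only [if_neg hp]
    rw [ih, bScan_step c rest _ hp]
    simp only [List.length_cons]
    push_cast
    ring_nf

-- ===== VERDICT (by name: the statement is the Claim_ definition above) =====
theorem identify_chunk_boundaries_py_spec : Claim_equal_identify_chunk_boundaries_py := by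
  intro content _
  show _ = _
  simp only [identify_chunk_boundaries_py, identify_chunk_boundaries_py_alt,
    splitOn_eq_mySplit, foldA]
  simpa using key content.toList [] 0
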